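-- pv_equiv track=rewrite | github.com/cathcart/AdventOfCode2019 | day4/solution.py | checkDoubles2
-- ===== SOURCE A (Python) =====
-- from functools import reduce
--
-- def checkDoubles2(inputStr):
-- 	if (len(inputStr) == len(set(inputStr))):
-- 		return False
--
-- 	results = [False]
-- 	for x in set(inputStr):
-- 		if(inputStr.count(x) == 2):
-- 			idx = inputStr.index(x)
--
-- 			if(idx > 0):
-- 				if(inputStr[idx - 1] == x):
-- 					results.append(True)
-- 			if(idx < len(inputStr) - 1):
-- 				if(inputStr[idx + 1] == x):
-- 					results.append(True)
--
-- 	return reduce(lambda x, y: x or y, results)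
-- ===== SOURCE B (Python) =====
-- def checkDoubles2(inputStr):
--     counts = {}
--     for ch in inputStr:
--         counts[ch] = counts.get(ch, 0) + 1
--     return any(a == b and counts[a] == 2 for a, b in zip(inputStr, inputStr[1:]))
-- ===== Notes on version B (the rewrite author's own statement) =====
-- stated objective: alternative
-- what changed: Replaces the per-character set loop with its repeated count/index/neighbour scans by one counting pass plus a single scan over adjacent pairs.
import Mathlib
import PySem

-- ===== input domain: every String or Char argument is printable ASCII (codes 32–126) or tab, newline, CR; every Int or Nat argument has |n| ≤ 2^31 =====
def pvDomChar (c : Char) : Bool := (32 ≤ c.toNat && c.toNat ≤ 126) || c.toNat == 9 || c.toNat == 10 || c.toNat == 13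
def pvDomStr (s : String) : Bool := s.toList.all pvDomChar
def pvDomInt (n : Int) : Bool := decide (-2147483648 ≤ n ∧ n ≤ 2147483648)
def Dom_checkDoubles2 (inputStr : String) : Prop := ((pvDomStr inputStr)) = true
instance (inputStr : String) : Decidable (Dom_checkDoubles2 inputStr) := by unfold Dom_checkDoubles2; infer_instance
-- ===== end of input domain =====

-- B replaces A's per-character set loop (each iteration rescanning the string with
-- count/index/neighbour checks) by one counting pass plus a single scan over adjacent pairs.


-- ===== PORT A =====
-- the body of A's `for x in set(inputStr)` loop, as a named helper
def pvStepA (l : List Char) (results : List Bool) (x : Char) : List Bool :=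
  if PySem.List.count l x = 2 then
    -- x comes from set(inputStr), so inputStr.index(x) succeeds; the getD default is never taken
    let idx : Int := ((PySem.List.index? l x).getD 0 : Nat)
    let results := if 0 < idx then
        (if PySem.List.pyGet? l (idx - 1) = some x then results ++ [true] else results)
      else results
    let results := if idx < (l.length : Int) - 1 then
        (if PySem.List.pyGet? l (idx + 1) = some x then results ++ [true] else results)
      else results
    results
  else results

def checkDoubles2 (inputStr : String) : Bool :=
  let l := inputStr.toList
  if l.length = (PySem.Set.ofList l).length then
    false
  else
    let results := (PySem.Set.ofList l).foldl (pvStepA l) [false]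
    -- reduce(or, results): results starts as [False], hence nonempty; [] is unreachable
    match results with
    | [] => false
    | r :: rest => rest.foldl (fun a b => a || b) r

-- ===== PORT B =====
def checkDoubles2_alt (inputStr : String) : Bool :=
  let l := inputStr.toList
  let counts : PySem.Dict Char Int := l.foldl (fun d ch => d.insert ch (d.getD ch 0 + 1)) PySem.Dict.empty
  (l.zip (PySem.List.slice l (some 1) none)).any
    (fun p => p.1 == p.2 && counts.getD p.1 0 == 2)

-- ===== PRECONDITION & SPEC =====
def Spec_checkDoubles2 (inputStr : String) (out : Bool) : Prop := out = checkDoubles2_alt inputStr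
instance (inputStr : String) (out : Bool) : Decidable (Spec_checkDoubles2 inputStr out) := by unfold Spec_checkDoubles2; infer_instance

-- ===== CLAIM (what is proved, stated in full; the proofs are below) =====
def Claim_equal_checkDoubles2 : Prop := ∀ (inputStr : String), Dom_checkDoubles2 inputStr → Spec_checkDoubles2 inputStr (checkDoubles2 inputStr)

-- ===== LEMMAS AND PROOFS =====

-- what one loop iteration of A appends to `results`
def pvU (l : List Char) (x : Char) : List Bool :=
  if PySem.List.count l x = 2 then
    let idx : Int := ((PySem.List.index? l x).getD 0 : Nat)
    (if 0 < idx then (if PySem.List.pyGet? l (idx - 1) = some x then [true] else []) else []) ++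
    (if idx < (l.length : Int) - 1 then (if PySem.List.pyGet? l (idx + 1) = some x then [true] else []) else [])
  else []

-- A's per-character test, as a Bool
def pvCond (l : List Char) (x : Char) : Bool :=
  if PySem.List.count l x = 2 then
    let idx : Int := ((PySem.List.index? l x).getD 0 : Nat)
    (decide (0 < idx) && decide (PySem.List.pyGet? l (idx - 1) = some x)) ||
    (decide (idx < (l.length : Int) - 1) && decide (PySem.List.pyGet? l (idx + 1) = some x))
  else false

-- B's test: some adjacent equal pair whose character occurs exactly twice
def pvAdj (l : List Char) : Bool :=
  (l.zip l.tail).any (fun p => p.1 == p.2 && l.count p.1 == 2)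

lemma pvStepA_eq (l : List Char) (acc : List Bool) (x : Char) :
    pvStepA l acc x = acc ++ pvU l x := by
  simp only [pvStepA, pvU]
  split_ifs with h h1 h2 h2' h2'' <;> simp_all

lemma pvU_any (l : List Char) (x : Char) : (pvU l x).any id = pvCond l x := by
  simp only [pvU, pvCond]
  split_ifs <;> simp_all

lemma pv_foldl_or (bs : List Bool) (b : Bool) :
    bs.foldl (fun a c => a || c) b = (b || bs.any id) := by
  induction bs generalizing b with
  | nil => simp
  | cons x xs ih => simp [ih, Bool.or_assoc]

lemma pv_any_ofList (l : List Char) (p : Char → Bool) :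
    (PySem.Set.ofList l).any p = l.any p := by
  apply Bool.eq_iff_iff.mpr
  simp [List.any_eq_true, PySem.Set.mem_ofList]

lemma pvAdj_iff (l : List Char) :
    pvAdj l = true ↔ ∃ (k : Nat) (h : k + 1 < l.length), l[k] = l[k+1] ∧ l.count l[k] = 2 := by
  simp only [pvAdj, List.any_eq_true]
  constructor
  · rintro ⟨p, hp, hcond⟩
    rcases List.mem_iff_getElem.mp hp with ⟨k, hk, hpk⟩
    have hk' : k + 1 < l.length := by
      have := hk; simp [List.length_zip, List.length_tail] at this; omega
    refine ⟨k, hk', ?_⟩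
    have hz : (l.zip l.tail)[k] = (l[k], l[k+1]) := by
      simp [List.getElem_zip, List.getElem_tail]
    rw [hz] at hpk
    rw [← hpk] at hcond
    simp only [Bool.and_eq_true, beq_iff_eq] at hcond
    exact ⟨hcond.1, hcond.2⟩
  · rintro ⟨k, hk, heq, hcnt⟩
    refine ⟨(l[k], l[k+1]), ?_, ?_⟩
    · apply List.mem_iff_getElem.mpr
      refine ⟨k, ?_, ?_⟩
      · simp [List.length_zip, List.length_tail]; omega
      · simp [List.getElem_zip, List.getElem_tail]
    · simp only [Bool.and_eq_true, beq_iff_eq]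
      exact ⟨heq, heq ▸ hcnt⟩

lemma pv_two_le_count (d : List Char) (c : Char) (i j : Nat) (hij : i < j) (hj : j < d.length)
    (hi' : d[i] = c) (hj' : d[j] = c) : 2 ≤ d.count c := by
  have hsub : (d.drop i).count c ≤ d.count c := (List.drop_sublist i d).count_le c
  have hdrop : d.drop i = d[i] :: d.drop (i + 1) := List.drop_eq_getElem_cons (by omega)
  have hmem : c ∈ d.drop (i + 1) := by
    have hlt : j - (i + 1) < (d.drop (i + 1)).length := by rw [List.length_drop]; omega
    have hg : (d.drop (i + 1))[j - (i + 1)] = c := by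
      rw [List.getElem_drop]
      simp_rw [show i + 1 + (j - (i + 1)) = j from by omega]
      exact hj'
    exact hg ▸ List.getElem_mem hlt
  have h1 : 0 < (d.drop (i + 1)).count c := List.count_pos_iff.mpr hmem
  rw [hdrop] at hsub
  have hc1 : (d[i] :: d.drop (i + 1)).count c = (d.drop (i + 1)).count c + 1 := by
    simp [hi']
  omega

lemma pv_three_le_count (d : List Char) (c : Char) (i j : Nat) (hij : i < j) (hj : j + 1 < d.length)
    (hi' : d[i] = c) (hj' : d[j] = c) (hj2 : d[j+1] = c) : 3 ≤ d.count c := by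
  have hsub : (d.drop i).count c ≤ d.count c := (List.drop_sublist i d).count_le c
  have hdrop : d.drop i = d[i] :: d.drop (i + 1) := List.drop_eq_getElem_cons (by omega)
  have hlen2 : j - i < (d.drop (i + 1)).length := by rw [List.length_drop]; omega
  have e1 : (d.drop (i + 1))[j - (i + 1)]'(by rw [List.length_drop]; omega) = c := by
    rw [List.getElem_drop]
    simp_rw [show i + 1 + (j - (i + 1)) = j from by omega]
    exact hj'
  have e2 : (d.drop (i + 1))[j - i]'hlen2 = c := by
    rw [List.getElem_drop]
    simp_rw [show i + 1 + (j - i) = j + 1 from by omega]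
    exact hj2
  have h2 : 2 ≤ (d.drop (i + 1)).count c :=
    pv_two_le_count (d.drop (i + 1)) c (j - (i + 1)) (j - i) (by omega) hlen2 e1 e2
  rw [hdrop] at hsub
  have hc1 : (d[i] :: d.drop (i + 1)).count c = (d.drop (i + 1)).count c + 1 := by
    simp [hi']
  omega

lemma pv_nodup_of_len (l : List Char) (h : l.length = (PySem.Set.ofList l).length) : l.Nodup := by
  have h1 : (PySem.Set.ofList l).Nodup := PySem.Set.nodup_ofList l
  have h2 : (PySem.Set.ofList l).toFinset = l.toFinset := by
    ext c; simp [List.mem_toFinset, PySem.Set.mem_ofList]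
  have h3 : l.toFinset.card = l.length := by
    rw [← h2, List.toFinset_card_of_nodup h1, ← h]
  have := Multiset.toFinset_card_eq_card_iff_nodup (m := (l : Multiset Char))
  simpa using this.mp h3

lemma pv_adj_false_of_nodup (l : List Char) (h : l.Nodup) : pvAdj l = false := by
  by_contra hne
  have ht : pvAdj l = true := by
    cases hx : pvAdj l with
    | false => exact absurd hx hne
    | true => rfl
  rcases (pvAdj_iff l).mp ht with ⟨k, hk, _, hcnt⟩
  have := List.nodup_iff_count_le_one.mp h l[k]
  omega

lemma pv_any_cond_eq_adj (l : List Char) : l.any (pvCond l) = pvAdj l := by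
  apply Bool.eq_iff_iff.mpr
  rw [List.any_eq_true, pvAdj_iff]
  constructor
  · rintro ⟨x, hx, hcond⟩
    simp only [pvCond] at hcond
    by_cases hc : PySem.List.count l x = 2
    · rw [if_pos hc] at hcond
      obtain ⟨k, hidx⟩ : ∃ k, PySem.List.index? l x = some k := by
        rcases h : PySem.List.index? l x with _ | k
        · rw [PySem.List.index?_eq_none_iff] at h; exact absurd hx h
        · exact ⟨k, rfl⟩
      obtain ⟨hk, hxk, hfirst⟩ := PySem.List.getElem_of_index?_eq_some hidx
      rw [hidx] at hcond
      simp only [Option.getD_some, Bool.or_eq_true, Bool.and_eq_true, decide_eq_true_eq] at hcond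
      have hcnt2 : l.count x = 2 := by rwa [PySem.List.count_eq] at hc
      rcases hcond with ⟨hk0, hget⟩ | ⟨hklt, hget⟩
      · -- l[k-1] = x with l[k] = x: adjacent pair at k-1
        have hk0' : 0 < k := by exact_mod_cast hk0
        have hcast : ((k : Int) - 1) = ((k - 1 : Nat) : Int) := by omega
        rw [hcast, PySem.List.pyGet?_natCast] at hget
        rcases List.getElem?_eq_some_iff.mp hget with ⟨hlt, hval⟩
        refine ⟨k - 1, by omega, ?_, ?_⟩
        · have e : k - 1 + 1 = k := by omega
          simp_rw [e, hval, hxk]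
        · rw [hval]; exact hcnt2
      · -- l[k+1] = x with l[k] = x: adjacent pair at k
        have hcast : ((k : Int) + 1) = ((k + 1 : Nat) : Int) := by omega
        rw [hcast, PySem.List.pyGet?_natCast] at hget
        rcases List.getElem?_eq_some_iff.mp hget with ⟨hlt, hval⟩
        exact ⟨k, hlt, by rw [hval, hxk], by rw [hxk]; exact hcnt2⟩
    · rw [if_neg hc] at hcond; exact absurd hcond (by simp)
  · rintro ⟨k, hk, heq, hcnt⟩
    refine ⟨l[k], List.getElem_mem (by omega), ?_⟩
    have hc : PySem.List.count l l[k] = 2 := by rwa [PySem.List.count_eq]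
    obtain ⟨m, hidx⟩ : ∃ m, PySem.List.index? l l[k] = some m := by
      rcases h : PySem.List.index? l l[k] with _ | m
      · exfalso
        rw [PySem.List.index?_eq_none_iff] at h
        exact h (List.getElem_mem (by omega))
      · exact ⟨m, rfl⟩
    obtain ⟨hm, hmk, hfirst⟩ := PySem.List.getElem_of_index?_eq_some hidx
    have hmle : m ≤ k := by
      by_contra hlt
      exact hfirst k (by omega) rfl
    rcases Nat.lt_or_ge m k with hmlt | hge
    · -- a strictly earlier occurrence plus the adjacent pair gives count ≥ 3: impossible
      exfalso
      have := pv_three_le_count l l[k] m k hmlt hk hmk rfl heq.symm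
      omega
    · have hmk' : m = k := by omega
      subst hmk'
      simp only [pvCond, if_pos hc, hidx, Option.getD_some, Bool.or_eq_true, Bool.and_eq_true,
        decide_eq_true_eq]
      right
      refine ⟨by omega, ?_⟩
      have hcast : ((m : Int) + 1) = ((m + 1 : Nat) : Int) := by omega
      rw [hcast, PySem.List.pyGet?_natCast]
      exact List.getElem?_eq_some_iff.mpr ⟨hk, heq.symm⟩

lemma pvA_eq (s : String) : checkDoubles2 s = pvAdj s.toList := by
  unfold checkDoubles2
  by_cases h : s.toList.length = (PySem.Set.ofList s.toList).length
  · rw [if_pos h]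
    exact (pv_adj_false_of_nodup _ (pv_nodup_of_len _ h)).symm
  · simp only [if_neg h]
    have hstep : pvStepA s.toList = fun acc x => acc ++ pvU s.toList x :=
      funext₂ (pvStepA_eq s.toList)
    rw [hstep, PySem.List.foldl_append_eq_flatMap]
    show (((PySem.Set.ofList s.toList).flatMap (pvU s.toList)).foldl (fun a b => a || b) (false || false)) = pvAdj s.toList
    rw [pv_foldl_or]
    simp only [Bool.false_or, List.any_flatMap]
    have : (fun x => (pvU s.toList x).any id) = pvCond s.toList := funext (pvU_any s.toList)
    rw [this, pv_any_ofList, pv_any_cond_eq_adj]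

lemma pv_beq_cast (n : Nat) : ((n : Int) == (2 : Int)) = (n == 2) := by
  apply Bool.eq_iff_iff.mpr
  simp only [beq_iff_eq]
  omega

lemma pvAlt_eq (s : String) : checkDoubles2_alt s = pvAdj s.toList := by
  have hc := PySem.Dict.foldl_insert_getD_add_one_eq_counter (xs := s.toList)
  simp only [checkDoubles2_alt, PySem.List.slice_from_one, hc, pvAdj,
    PySem.Dict.getD_counter, pv_beq_cast]

-- ===== VERDICT (by name: the statement is the Claim_ definition above) =====
theorem checkDoubles2_spec : Claim_equal_checkDoubles2 := by
  intro s _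
  unfold Spec_checkDoubles2
  rw [pvA_eq, pvAlt_eq]
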